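-- pv_equiv track=rewrite | github.com/eugene-kuchansky/advent-of-code | advent2018/day02/day02.py | calc1
-- ===== SOURCE A (Python) =====
-- from typing import List
-- from collections import Counter
--
-- def calc1(data: List[str]) -> int:
--     two_letters = 0
--     three_letters = 0
--     for word in data:
--         letters_counts = set(Counter(word).values())
--         two_letters += int(2 in letters_counts)
--         three_letters += int(3 in letters_counts)
--     return two_letters * three_letters
-- ===== SOURCE B (Python) =====
-- def calc1(data):
--     two_letters = 0
--     three_letters = 0
--     for word in data:
--         w = sorted(word)
--         lengths = set()
--         i = 0
--         n = len(w)
--         while i < n: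
--             j = i
--             while j < n and w[j] == w[i]:
--                 j += 1
--             lengths.add(j - i)
--             i = j
--         two_letters += 2 in lengths
--         three_letters += 3 in lengths
--     return two_letters * three_letters
-- ===== Notes on version B (the rewrite author's own statement) =====
-- stated objective: alternative
-- what changed: Per-word letter frequencies are obtained by sorting the word and scanning maximal runs of equal letters (run lengths replace Counter values); no dict/Counter is built.
import Mathlib
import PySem

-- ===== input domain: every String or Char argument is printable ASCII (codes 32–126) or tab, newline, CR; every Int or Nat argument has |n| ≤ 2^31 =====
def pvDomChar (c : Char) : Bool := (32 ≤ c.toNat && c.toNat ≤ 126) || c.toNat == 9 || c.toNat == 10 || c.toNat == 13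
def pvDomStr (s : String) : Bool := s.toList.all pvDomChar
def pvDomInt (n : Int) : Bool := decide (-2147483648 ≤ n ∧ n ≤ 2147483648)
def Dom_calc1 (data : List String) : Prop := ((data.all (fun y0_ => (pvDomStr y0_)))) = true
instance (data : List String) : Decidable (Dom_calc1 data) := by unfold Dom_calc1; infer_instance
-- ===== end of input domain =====

-- B replaces Counter-based frequency counting by sorting each word and scanning maximal runs
-- of equal letters (the run lengths are the letter counts); alternative algorithm, same cost class.

-- ===== PORT A =====
def calc1 (data : List String) : Int :=
  let p := data.foldl (fun (acc : Int × Int) word =>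
    let letters_counts := PySem.Set.ofList (PySem.Dict.counter word.toList).values
    (acc.1 + (if (2 : Int) ∈ letters_counts then 1 else 0),
     acc.2 + (if (3 : Int) ∈ letters_counts then 1 else 0))) (0, 0)
  p.1 * p.2

-- ===== PORT B =====
-- the inner pair of while loops of Source B: emit the length of each maximal run of equal
-- letters (the inner 'while w[j] == w[i]' is the takeWhile part, advancing i to j is dropWhile)
def pvRunLengths : List Char → List Nat
  | [] => []
  | c :: rest =>
      ((rest.takeWhile (fun x => x == c)).length + 1)
        :: pvRunLengths (rest.dropWhile (fun x => x == c))
  termination_by l => l.length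
  decreasing_by
    simpa using Nat.lt_succ_of_le (List.length_dropWhile_le (fun x => x == c) rest)

def calc1_alt (data : List String) : Int :=
  let p := data.foldl (fun (acc : Int × Int) word =>
    let lengths := PySem.Set.ofList (pvRunLengths (PySem.List.sorted word.toList (fun x => x) false))
    (acc.1 + (if 2 ∈ lengths then 1 else 0),
     acc.2 + (if 3 ∈ lengths then 1 else 0))) (0, 0)
  p.1 * p.2

-- ===== PRECONDITION & SPEC =====
def Spec_calc1 (data : List String) (out : Int) : Prop := out = calc1_alt data
instance (data : List String) (out : Int) : Decidable (Spec_calc1 data out) := by unfold Spec_calc1; infer_instance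

-- ===== CLAIM (what is proved, stated in full; the proofs are below) =====
def Claim_equal_calc1 : Prop := ∀ (data : List String), Dom_calc1 data → Spec_calc1 data (calc1 data)

-- ===== LEMMAS AND PROOFS =====

-- On a (≤-)sorted list the run lengths are exactly the multiplicities of its elements.
theorem mem_pvRunLengths (l : List Char) (h : l.Pairwise (· ≤ ·)) (n : Nat) :
    n ∈ pvRunLengths l ↔ ∃ c ∈ l, l.count c = n := by
  induction l using pvRunLengths.induct with
  | case1 => simp [pvRunLengths]
  | case2 c rest ih =>
    have hc : ∀ x ∈ rest, c ≤ x := fun x hx => (List.pairwise_cons.mp h).1 x hx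
    have hrest : rest.Pairwise (· ≤ ·) := (List.pairwise_cons.mp h).2
    set tw := rest.takeWhile (fun x => x == c) with htw
    set dw := rest.dropWhile (fun x => x == c) with hdw
    have hsplit : tw ++ dw = rest := List.takeWhile_append_dropWhile ..
    have htwc : ∀ x ∈ tw, x = c := fun x hx => by
      simpa using List.mem_takeWhile_imp hx
    have hdwp : dw.Pairwise (· ≤ ·) := hrest.sublist (List.dropWhile_sublist _)
    have hdwsub : dw.Sublist rest := List.dropWhile_sublist _
    have hcndw : c ∉ dw := by
      intro hmem
      cases hd : dw with
      | nil => rw [hd] at hmem; simp at hmem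
      | cons d0 ds =>
        have hl : 0 < (rest.dropWhile (fun x => x == c)).length := by
          rw [← hdw, hd]; simp
        have hd0ne : ¬ (d0 == c) = true := by
          have := List.dropWhile_get_zero_not (fun x => x == c) rest hl
          simpa [← hdw, hd] using this
        have hd0dw : d0 ∈ dw := by rw [hd]; simp
        have hcd0 : c ≤ d0 := hc d0 (hdwsub.mem hd0dw)
        have hclt : c < d0 :=
          lt_of_le_of_ne hcd0 (fun he => hd0ne (beq_iff_eq.mpr he.symm))
        rw [hd] at hmem
        rcases List.mem_cons.mp hmem with h1 | h1
        · exact absurd h1 (ne_of_lt hclt)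
        · have hle : d0 ≤ c := by
            rw [hd] at hdwp
            exact (List.pairwise_cons.mp hdwp).1 c h1
          exact absurd (lt_of_lt_of_le hclt hle) (lt_irrefl c)
    have htwlen : tw.count c = tw.length := by
      rw [List.count_eq_length]
      intro a ha; exact (htwc a ha).symm
    have hcount_c : (c :: rest).count c = tw.length + 1 := by
      have h2 : rest.count c = tw.count c + dw.count c := by
        conv_lhs => rw [← hsplit]
        rw [List.count_append]
      rw [List.count_cons_self, h2, htwlen, List.count_eq_zero.mpr hcndw]
    have hcount_d : ∀ d, d ≠ c → (c :: rest).count d = dw.count d := by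
      intro d hd
      have h0 : tw.count d = 0 := List.count_eq_zero.mpr (fun hmem => hd (htwc d hmem))
      have h2 : rest.count d = tw.count d + dw.count d := by
        conv_lhs => rw [← hsplit]
        rw [List.count_append]
      simp [h2, h0, Ne.symm hd]
    constructor
    · intro hn
      rw [pvRunLengths] at hn
      rcases List.mem_cons.mp hn with h1 | h1
      · exact ⟨c, by simp, by rw [hcount_c]; exact h1.symm⟩
      · rcases (ih hdwp).mp h1 with ⟨d, hdmem, hdcnt⟩
        have hdnec : d ≠ c := fun he => hcndw (he ▸ hdmem)
        refine ⟨d, List.mem_cons_of_mem _ (hdwsub.mem hdmem), ?_⟩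
        rw [hcount_d d hdnec]; exact hdcnt
    · rintro ⟨d, hdmem, hdcnt⟩
      rw [pvRunLengths]
      by_cases hdc : d = c
      · subst hdc
        rw [hcount_c] at hdcnt
        exact List.mem_cons.mpr (Or.inl hdcnt.symm)
      · have hdrest : d ∈ rest := by
          rcases List.mem_cons.mp hdmem with h1 | h1
          · exact absurd h1 hdc
          · exact h1
        have hddw : d ∈ dw := by
          rw [← hsplit] at hdrest
          rcases List.mem_append.mp hdrest with h1 | h1
          · exact absurd (htwc d h1) hdc
          · exact h1
        refine List.mem_cons.mpr (Or.inr ((ih hdwp).mpr ⟨d, hddw, ?_⟩))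
        rw [← hcount_d d hdc]; exact hdcnt

-- per word: k is a Counter value of w iff k is a run length of sorted(w)
theorem word_keys_iff (w : List Char) (k : Nat) :
    ((k : Int) ∈ PySem.Set.ofList (PySem.Dict.counter w).values) ↔
      (k ∈ PySem.Set.ofList (pvRunLengths (PySem.List.sorted w (fun x => x) false))) := by
  set s := PySem.List.sorted w (fun x => x) false with hs
  have hperm : s.Perm w := PySem.List.sorted_perm ..
  have hpw : s.Pairwise (· ≤ ·) := by
    simpa using PySem.List.sorted_pairwise w (fun x => x)
  have hvals : (PySem.Dict.counter w).values
      = (PySem.Set.ofList w).map (fun c => ((w.count c : Int))) := by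
    have hit := PySem.Dict.items_counter (xs := w)
    calc (PySem.Dict.counter w).values = (PySem.Dict.counter w).items.map (·.2) := rfl
      _ = _ := by rw [hit, List.map_map]; rfl
  simp only [PySem.Set.mem_ofList, hvals, List.mem_map]
  rw [mem_pvRunLengths s hpw k]
  constructor
  · rintro ⟨c, hc, hck⟩
    refine ⟨c, hperm.mem_iff.mpr hc, ?_⟩
    rw [hperm.count_eq]; exact_mod_cast hck
  · rintro ⟨c, hc, hck⟩
    refine ⟨c, hperm.mem_iff.mp hc, ?_⟩
    rw [← hperm.count_eq]; exact_mod_cast hck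

-- the two per-word loop bodies agree
theorem step_eq (acc : Int × Int) (word : String) :
    (let letters_counts := PySem.Set.ofList (PySem.Dict.counter word.toList).values
     ((acc.1 + (if (2 : Int) ∈ letters_counts then 1 else 0),
       acc.2 + (if (3 : Int) ∈ letters_counts then 1 else 0)) : Int × Int)) =
    (let lengths := PySem.Set.ofList (pvRunLengths (PySem.List.sorted word.toList (fun x => x) false))
     (acc.1 + (if 2 ∈ lengths then 1 else 0),
      acc.2 + (if 3 ∈ lengths then 1 else 0))) := by
  have h2 := word_keys_iff word.toList 2
  have h3 := word_keys_iff word.toList 3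
  push_cast at h2 h3
  simp only [h2, h3]

theorem fold_eq (l : List String) (acc : Int × Int) :
    l.foldl (fun (acc : Int × Int) word =>
      let letters_counts := PySem.Set.ofList (PySem.Dict.counter word.toList).values
      (acc.1 + (if (2 : Int) ∈ letters_counts then 1 else 0),
       acc.2 + (if (3 : Int) ∈ letters_counts then 1 else 0))) acc =
    l.foldl (fun (acc : Int × Int) word =>
      let lengths := PySem.Set.ofList (pvRunLengths (PySem.List.sorted word.toList (fun x => x) false))
      (acc.1 + (if 2 ∈ lengths then 1 else 0),
       acc.2 + (if 3 ∈ lengths then 1 else 0))) acc := by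
  induction l generalizing acc with
  | nil => rfl
  | cons w t iht =>
    simp only [List.foldl_cons]
    rw [step_eq]
    exact iht _

-- ===== VERDICT (by name: the statement is the Claim_ definition above) =====
theorem calc1_spec : Claim_equal_calc1 := by
  intro data _
  show calc1 data = calc1_alt data
  exact congrArg (fun p : Int × Int => p.1 * p.2) (fold_eq data (0, 0))
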